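-- pv_equiv track=rewrite | github.com/hadasabraham/CodingTool | algorithms/decoder.py | q_ary_rev
-- ===== SOURCE A (Python) =====
-- from typing import NewType, Tuple, List, Optional
--
-- def q_ary_rev(n_list: List, q):
--     result = 0
--     if q == 2:
--         for digits in n_list:
--             result = (result << 1) | digits
--         return result
--     for digits in n_list:
--         result = (result * q) + digits
--     return result
-- ===== SOURCE B (Python) =====
-- def q_ary_rev(n_list, q):
--     # Place-value summation: walk the digits from the least-significant end,
--     # keeping an explicit positional weight. (Return value only; no q == 2
--     # special case is needed for valid binary digit lists.)
--     result = 0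
--     power = 1
--     for digit in reversed(n_list):
--         result += digit * power
--         power *= q
--     return result
-- ===== Notes on version B (the rewrite author's own statement) =====
-- stated objective: alternative
-- what changed: Replaces Horner's folded accumulator (with a bit-shift/OR special case for q==2) by a reverse traversal that sums digit*power with an explicit positional weight, dropping the q==2 branch.
-- outside the precondition, e.g. on q_ary_rev([1, 3], 2): A returns 3, B returns 5
import Mathlib
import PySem

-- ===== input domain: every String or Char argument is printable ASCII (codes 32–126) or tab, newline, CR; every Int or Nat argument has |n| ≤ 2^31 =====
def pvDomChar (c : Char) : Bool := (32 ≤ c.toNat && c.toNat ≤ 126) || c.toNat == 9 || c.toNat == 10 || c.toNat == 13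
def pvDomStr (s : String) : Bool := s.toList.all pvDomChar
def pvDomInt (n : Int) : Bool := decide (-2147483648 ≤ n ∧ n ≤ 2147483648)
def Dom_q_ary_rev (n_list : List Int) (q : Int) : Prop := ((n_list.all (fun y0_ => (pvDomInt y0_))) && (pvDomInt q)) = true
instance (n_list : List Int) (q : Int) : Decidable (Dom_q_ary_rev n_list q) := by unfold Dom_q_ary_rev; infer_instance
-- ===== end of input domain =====

-- B drops A's q==2 shift/OR fast path and computes the value as an explicit
-- place-value sum over the reversed digit list (alternative decomposition, same cost).


-- ===== PORT A =====
def q_ary_rev (n_list : List Int) (q : Int) : Int :=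
  if q = 2 then
    n_list.foldl (fun result digits => PySem.Int.bor (result <<< (1 : Nat)) digits) 0
  else
    n_list.foldl (fun result digits => result * q + digits) 0

-- ===== PORT B =====
def q_ary_rev_alt (n_list : List Int) (q : Int) : Int :=
  (n_list.reverse.foldl (fun (s : Int × Int) digit => (s.1 + digit * s.2, s.2 * q)) (0, 1)).1

-- ===== PRECONDITION & SPEC =====
-- Pre_ excludes q == 2 with some digit outside {0,1}: there the list is not a valid
-- binary digit string and A's bitwise-OR accumulation (which ignores carries) and the
-- positional sum are equally arbitrary readings of malformed input.
def Pre_q_ary_rev (n_list : List Int) (q : Int) : Prop :=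
  q = 2 → ∀ d ∈ n_list, d = 0 ∨ d = 1
instance (n_list : List Int) (q : Int) : Decidable (Pre_q_ary_rev n_list q) := by
  unfold Pre_q_ary_rev; infer_instance
def pvWitness_q_ary_rev : List Int × Int := ([1, 0, 1], 2)

def Spec_q_ary_rev (n_list : List Int) (q : Int) (out : Int) : Prop := out = q_ary_rev_alt n_list q
instance (n_list : List Int) (q : Int) (out : Int) : Decidable (Spec_q_ary_rev n_list q out) := by unfold Spec_q_ary_rev; infer_instance

-- ===== CLAIM (what is proved, stated in full; the proofs are below) =====
def Claim_equal_q_ary_rev : Prop := ∀ (n_list : List Int) (q : Int), Dom_q_ary_rev n_list q → Pre_q_ary_rev n_list q → Spec_q_ary_rev n_list q (q_ary_rev n_list q)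

-- ===== LEMMAS AND PROOFS =====

/-- Reference value: sum of digit * q^position. -/
def pvVal (q : Int) : List Int → Int
  | [] => 0
  | d :: t => d * q ^ t.length + pvVal q t

lemma pvHorner (q : Int) : ∀ (l : List Int) (r : Int),
    l.foldl (fun a d => a * q + d) r = r * q ^ l.length + pvVal q l := by
  intro l
  induction l with
  | nil => intro r; simp [pvVal]
  | cons d t ih =>
    intro r
    simp only [List.foldl_cons, ih, pvVal, List.length_cons, pow_succ]
    ring

lemma pvAltFoldr (q : Int) : ∀ (l : List Int),
    l.foldr (fun d (s : Int × Int) => (s.1 + d * s.2, s.2 * q)) (0, 1) =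
      (pvVal q l, q ^ l.length) := by
  intro l
  induction l with
  | nil => simp [pvVal]
  | cons d t ih =>
    simp only [List.foldr_cons, ih, pvVal, List.length_cons, pow_succ]
    simp only [Prod.mk.injEq]
    exact ⟨by ring, trivial⟩

lemma pvAltVal (q : Int) (l : List Int) : q_ary_rev_alt l q = pvVal q l := by
  unfold q_ary_rev_alt
  rw [List.foldl_reverse]
  simp only [pvAltFoldr]

lemma pvBorStep (r d : Int) (hd : d = 0 ∨ d = 1) :
    PySem.Int.bor (r <<< (1 : Nat)) d = r * 2 + d := by
  have hshift : r <<< (1 : Nat) = r * 2 := by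
    rw [Int.shiftLeft_eq]; norm_num
  rcases hd with rfl | rfl
  · simp [hshift]
  · rw [hshift, show r * 2 = 2 * r by ring]
    by_cases hr : 0 ≤ r
    · obtain ⟨k, rfl⟩ := Int.eq_ofNat_of_zero_le hr
      have h1 : (2 * (k : Int)) = ((2 * k : Nat) : Int) := by push_cast; ring
      rw [h1, show (1 : Int) = ((1 : Nat) : Int) from rfl, PySem.Int.bor_natCast]
      have h2 : 2 * k ||| 1 = 2 * k + 1 := by
        simpa [Nat.bit] using Nat.lor_bit false k true 0
      rw [h2]; push_cast; ring
    · have h2 : ¬ (0 ≤ 2 * r) := by omega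
      simp only [PySem.Int.bor, if_neg h2, if_pos (by norm_num : (0 : Int) ≤ 1)]
      have hm : ((-(2 * r) - 1).toNat : Int) = -(2 * r) - 1 :=
        Int.toNat_of_nonneg (by omega)
      have hmod : (-(2 * r) - 1).toNat % 2 = 1 := by omega
      rw [show ((1 : Int)).toNat = 1 from rfl, Nat.and_one_is_mod, hmod]
      omega

lemma pvBorFold : ∀ (l : List Int) (r : Int), (∀ d ∈ l, d = 0 ∨ d = 1) →
    l.foldl (fun a d => PySem.Int.bor (a <<< (1 : Nat)) d) r =
      l.foldl (fun a d => a * 2 + d) r := by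
  intro l
  induction l with
  | nil => intro r _; rfl
  | cons d t ih =>
    intro r h
    simp only [List.foldl_cons]
    rw [pvBorStep r d (h d (by simp))]
    exact ih _ (fun x hx => h x (by simp [hx]))

-- ===== VERDICT (by name: the statement is the Claim_ definition above) =====
theorem q_ary_rev_spec : Claim_equal_q_ary_rev := by
  intro n_list q _ hpre
  unfold Spec_q_ary_rev q_ary_rev
  rw [pvAltVal]
  by_cases hq : q = 2
  · subst hq
    rw [if_pos rfl, pvBorFold n_list 0 (hpre rfl), pvHorner]
    simp
  · rw [if_neg hq, pvHorner]
    simp
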